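-- pv_equiv track=rewrite | github.com/RobbeW/Data_Statistiek_R | Deel 3 Algoritmiek/02 Dictionaries/14 Swishing/solution/solution.nl.py | kledijruil
-- ===== SOURCE A (Python) =====
-- def kledijruil(kleerkast1, kleerkast2):
--     dict1 = {}
--     for kledij in kleerkast1:
--         if kledij in dict1:
--             dict1[kledij] += 1
--         else:
--             dict1[kledij] = 1
--
--     dict2 = {}
--     for kledij in kleerkast2:
--         if kledij in dict2:
--             dict2[kledij] += 1
--         else:
--             dict2[kledij] = 1
--
--     aantal = 0
--     for k, v in dict1.items():
--         if k in dict2: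
--             aantal += min(v, dict2[k])
--
--     return aantal
-- ===== SOURCE B (Python) =====
-- def kledijruil(kleerkast1, kleerkast2):
--     resterend = {}
--     for kledij in kleerkast1:
--         resterend[kledij] = resterend.get(kledij, 0) + 1
--     aantal = 0
--     for kledij in kleerkast2:
--         if resterend.get(kledij, 0) > 0:
--             resterend[kledij] -= 1
--             aantal += 1
--     return aantal
-- ===== Notes on version B (the rewrite author's own statement) =====
-- stated objective: alternative
-- what changed: B builds only one frequency dict (from kleerkast1) and then streams once over kleerkast2, consuming a remaining count per matched item, instead of building two dicts and summing min(v1,v2) over shared keys.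
import Mathlib
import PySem

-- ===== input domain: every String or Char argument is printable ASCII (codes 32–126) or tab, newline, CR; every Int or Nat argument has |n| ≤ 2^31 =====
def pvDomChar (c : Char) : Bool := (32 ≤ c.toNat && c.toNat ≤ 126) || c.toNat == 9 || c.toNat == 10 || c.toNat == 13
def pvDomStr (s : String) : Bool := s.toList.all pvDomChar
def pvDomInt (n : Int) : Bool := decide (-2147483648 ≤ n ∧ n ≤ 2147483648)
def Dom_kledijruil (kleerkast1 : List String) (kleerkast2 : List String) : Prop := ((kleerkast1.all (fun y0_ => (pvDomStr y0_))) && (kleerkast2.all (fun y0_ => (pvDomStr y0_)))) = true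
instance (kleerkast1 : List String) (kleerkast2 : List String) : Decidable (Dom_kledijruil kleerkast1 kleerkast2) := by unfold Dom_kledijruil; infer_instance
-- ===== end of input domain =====

-- ===== PORT A =====
-- A: two counting dicts, then sum of min(v1, v2) over keys of dict1 present in dict2.
def kledijruil (kleerkast1 : List String) (kleerkast2 : List String) : Int :=
  let dict1 := kleerkast1.foldl
    (fun d kledij => if d.contains kledij then d.modify kledij 0 (· + 1) else d.insert kledij 1)
    PySem.Dict.empty
  let dict2 := kleerkast2.foldl
    (fun d kledij => if d.contains kledij then d.modify kledij 0 (· + 1) else d.insert kledij 1)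
    PySem.Dict.empty
  dict1.items.foldl
    (fun aantal p => if dict2.contains p.1 then aantal + min p.2 (dict2.getD p.1 0) else aantal)
    0

-- ===== PORT B =====
-- B: one frequency dict from kleerkast1, then a single consuming pass over kleerkast2.
def kledijruil_alt (kleerkast1 : List String) (kleerkast2 : List String) : Int :=
  let resterend := kleerkast1.foldl
    (fun d kledij => d.insert kledij (d.getD kledij 0 + 1)) PySem.Dict.empty
  (kleerkast2.foldl
    (fun (st : PySem.Dict String Int × Int) kledij =>
      if st.1.getD kledij 0 > 0 then (st.1.modify kledij 0 (· - 1), st.2 + 1) else st)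
    (resterend, 0)).2

-- ===== PRECONDITION & SPEC =====
def Spec_kledijruil (kleerkast1 : List String) (kleerkast2 : List String) (out : Int) : Prop := out = kledijruil_alt kleerkast1 kleerkast2
instance (kleerkast1 : List String) (kleerkast2 : List String) (out : Int) : Decidable (Spec_kledijruil kleerkast1 kleerkast2 out) := by unfold Spec_kledijruil; infer_instance

-- ===== CLAIM (what is proved, stated in full; the proofs are below) =====
def Claim_equal_kledijruil : Prop := ∀ (kleerkast1 : List String) (kleerkast2 : List String), Dom_kledijruil kleerkast1 kleerkast2 → Spec_kledijruil kleerkast1 kleerkast2 (kledijruil kleerkast1 kleerkast2)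

-- ===== LEMMAS AND PROOFS =====

-- both programs compute Σ_{k ∈ distinct kleerkast1} min(count₁ k, count₂ k)
def pvMinSum (kleerkast1 : List String) (ys : List String) : Int :=
  ((PySem.Set.ofList kleerkast1).map
    (fun k => min ((kleerkast1.count k : Int)) ((ys.count k : Int)))).sum

theorem stepA_eq_modify (d : PySem.Dict String Int) (k : String) :
    (if d.contains k then d.modify k 0 (· + 1) else d.insert k 1) = d.modify k 0 (· + 1) := by
  by_cases h : d.contains k
  · simp [h]
  · simp only [Bool.not_eq_true] at h
    simp [h, PySem.Dict.modify, PySem.Dict.getD_of_not_contains (h := h)]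

theorem buildA_eq_counter (xs : List String) :
    xs.foldl (fun d kledij => if d.contains kledij then d.modify kledij 0 (· + 1) else d.insert kledij 1)
      PySem.Dict.empty = PySem.Dict.counter xs :=
  (PySem.List.foldl_congr_mem xs _ (fun d kledij => d.modify kledij 0 (· + 1)) _
    (fun d k _ => stepA_eq_modify d k)).trans rfl

theorem kledijruil_eq_minSum (kleerkast1 kleerkast2 : List String) :
    kledijruil kleerkast1 kleerkast2 = pvMinSum kleerkast1 kleerkast2 := by
  unfold kledijruil
  simp only [buildA_eq_counter, PySem.Dict.items_counter]
  rw [PySem.List.foldl_congr_mem _ _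
    (fun aantal p => aantal + min p.2 ((kleerkast2.count p.1 : Int))) _ ?_]
  · rw [PySem.List.foldl_add, List.map_map]
    simp [pvMinSum, Function.comp_def]
  · intro acc p hp
    simp only [List.mem_map] at hp
    obtain ⟨k, _, rfl⟩ := hp
    by_cases h : (PySem.Dict.counter kleerkast2).contains k
    · simp [h, PySem.Dict.getD_counter]
    · simp only [Bool.not_eq_true] at h
      have hmem : k ∉ kleerkast2 := by
        have := PySem.Dict.contains_counter kleerkast2 k
        rw [h] at this
        simpa using this.symm
      simp only [h, List.count_eq_zero_of_not_mem hmem]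
      simp

theorem sum_map_succ_at {s : List String} (hnd : s.Nodup) {y : String} (hy : y ∈ s)
    (f g : String → Int) (hfy : f y = g y + 1) (hfk : ∀ k, k ≠ y → f k = g k) :
    (s.map f).sum = (s.map g).sum + 1 := by
  induction s with
  | nil => cases hy
  | cons a s ih =>
    rcases List.mem_cons.mp hy with rfl | hy'
    · have : s.map f = s.map g := List.map_congr_left (fun k hk => hfk k (by
        intro h; exact (List.nodup_cons.mp hnd).1 (h ▸ hk)))
      simp only [List.map_cons, List.sum_cons, this, hfy]; ring
    · have ha : a ≠ y := by rintro rfl; exact (List.nodup_cons.mp hnd).1 hy'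
      have := ih (List.nodup_cons.mp hnd).2 hy'
      simp only [List.map_cons, List.sum_cons, hfk a ha, this]; ring

theorem consume_invariant (kleerkast1 : List String) (ys : List String) :
    (∀ k, (ys.foldl
        (fun (st : PySem.Dict String Int × Int) kledij =>
          if st.1.getD kledij 0 > 0 then (st.1.modify kledij 0 (· - 1), st.2 + 1) else st)
        (PySem.Dict.counter kleerkast1, 0)).1.getD k 0
          = max ((kleerkast1.count k : Int) - (ys.count k : Int)) 0)
    ∧ (ys.foldl
        (fun (st : PySem.Dict String Int × Int) kledij =>
          if st.1.getD kledij 0 > 0 then (st.1.modify kledij 0 (· - 1), st.2 + 1) else st)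
        (PySem.Dict.counter kleerkast1, 0)).2 = pvMinSum kleerkast1 ys := by
  induction ys using List.reverseRecOn with
  | nil =>
    constructor
    · intro k
      simp [PySem.Dict.getD_counter]
    · simp only [List.foldl_nil]
      symm
      apply List.sum_eq_zero
      intro x hx
      simp only [List.mem_map] at hx
      obtain ⟨k, _, rfl⟩ := hx
      simp
  | append_singleton ys y ih =>
    obtain ⟨ihd, ihs⟩ := ih
    rw [List.foldl_append] at *
    simp only [List.foldl_cons, List.foldl_nil]
    constructor
    · intro k
      split_ifs with h
      · rw [ihd y] at h
        simp only [PySem.Dict.getD_modify, ihd]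
        by_cases hk : k = y
        · subst hk
          rw [if_pos rfl, List.count_append, List.count_singleton' k k, if_pos rfl]
          push_cast
          omega
        · rw [if_neg hk, List.count_append, List.count_singleton' k y, if_neg (Ne.symm hk)]
          push_cast
          omega
      · rw [ihd y] at h
        rw [ihd k]
        by_cases hk : k = y
        · subst hk
          rw [List.count_append, List.count_singleton' k k, if_pos rfl]
          push_cast
          omega
        · rw [List.count_append, List.count_singleton' k y, if_neg (Ne.symm hk)]
          push_cast
          omega
    · split_ifs with h
      · rw [ihd y] at h
        simp only [ihs]
        have hlt : (ys.count y : Int) < (kleerkast1.count y : Int) := by omega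
        have hy1 : y ∈ kleerkast1 := by
          by_contra hy
          rw [List.count_eq_zero_of_not_mem hy] at hlt
          omega
        unfold pvMinSum
        refine (sum_map_succ_at (PySem.Set.nodup_ofList kleerkast1)
          ((PySem.Set.mem_ofList kleerkast1 y).mpr hy1) _ _ ?_ ?_).symm
        · rw [List.count_append, List.count_singleton' y y, if_pos rfl]
          push_cast
          omega
        · intro k hk
          rw [List.count_append, List.count_singleton' k y, if_neg (Ne.symm hk)]
          push_cast
          ring_nf
      · rw [ihd y] at h
        rw [ihs]
        unfold pvMinSum
        congr 1
        apply List.map_congr_left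
        intro k _
        by_cases hk : k = y
        · subst hk
          rw [List.count_append, List.count_singleton' k k, if_pos rfl]
          push_cast
          omega
        · rw [List.count_append, List.count_singleton' k y, if_neg (Ne.symm hk)]
          push_cast
          ring_nf

theorem kledijruil_alt_eq_minSum (kleerkast1 kleerkast2 : List String) :
    kledijruil_alt kleerkast1 kleerkast2 = pvMinSum kleerkast1 kleerkast2 := by
  unfold kledijruil_alt
  simp only [PySem.Dict.foldl_insert_getD_add_one_eq_counter]
  exact (consume_invariant kleerkast1 kleerkast2).2

-- ===== VERDICT (by name: the statement is the Claim_ definition above) =====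
theorem kledijruil_spec : Claim_equal_kledijruil := by
  intro kleerkast1 kleerkast2 _
  unfold Spec_kledijruil
  rw [kledijruil_eq_minSum, kledijruil_alt_eq_minSum]
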